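-- pv_equiv track=rewrite | github.com/darae-lee/GETMic | coverage/convert_target_code.py | separate_code
-- ===== SOURCE A (Python) =====
-- def separate_code(code):
--     import_end_lineno = 0
--     loop_start_lineno = 0
--     for i, line in enumerate(code):
--         sline = line.strip()
--         if sline.startswith("from") or sline.startswith("import"):
--             import_end_lineno = i
--         elif sline.startswith("while True:"):
--             loop_start_lineno = i
--     return import_end_lineno, loop_start_lineno
-- ===== SOURCE B (Python) =====
-- def separate_code(code):
--     import_end_lineno = 0
--     for i in range(len(code) - 1, -1, -1):
--         s = code[i].strip()
--         if s.startswith("from") or s.startswith("import"):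
--             import_end_lineno = i
--             break
--     loop_start_lineno = 0
--     for i in range(len(code) - 1, -1, -1):
--         s = code[i].strip()
--         if s.startswith("while True:"):
--             loop_start_lineno = i
--             break
--     return import_end_lineno, loop_start_lineno
-- ===== Notes on version B (the rewrite author's own statement) =====
-- stated objective: simpler
-- what changed: Replaced the single forward loop carrying two accumulators by two independent reverse scans that each return the first (i.e. last-in-forward-order) matching line index and break immediately.
import Mathlib
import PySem

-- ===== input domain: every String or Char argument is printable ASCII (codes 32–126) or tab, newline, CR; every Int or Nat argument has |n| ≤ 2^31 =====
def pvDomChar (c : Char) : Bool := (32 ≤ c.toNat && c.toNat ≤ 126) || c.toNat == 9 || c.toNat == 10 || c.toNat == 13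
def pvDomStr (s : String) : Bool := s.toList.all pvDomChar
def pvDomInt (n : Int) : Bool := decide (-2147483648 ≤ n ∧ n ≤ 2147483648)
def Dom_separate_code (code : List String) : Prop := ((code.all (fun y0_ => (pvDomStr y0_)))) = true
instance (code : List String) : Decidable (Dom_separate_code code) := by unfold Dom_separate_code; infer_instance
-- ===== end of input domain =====

-- B replaces A's single forward loop with two accumulators by two independent
-- reverse scans that each break at the first match (objective: simpler).

-- ===== PORT A =====
-- stepA is A's loop body (one iteration of the forward loop)
def stepA (st : Int × Int) (p : Int × String) : Int × Int :=
  let sline := PySem.Str.strip p.2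
  if PySem.Str.startswith sline "from" || PySem.Str.startswith sline "import" then
    (p.1, st.2)
  else if PySem.Str.startswith sline "while True:" then
    (st.1, p.1)
  else st

def separate_code (code : List String) : Int × Int :=
  (PySem.List.enumerate code).foldl stepA (0, 0)

-- ===== PORT B =====
-- B's loops run i from len(code)-1 down to 0 reading code[i] and break at the
-- first match; that is a first-match scan over the reversed enumerated list.
def findRevImport : List (Int × String) → Int
  | [] => 0
  | (i, l) :: rest =>
    let s := PySem.Str.strip l
    if PySem.Str.startswith s "from" || PySem.Str.startswith s "import" then i
    else findRevImport rest

def findRevWhile : List (Int × String) → Int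
  | [] => 0
  | (i, l) :: rest =>
    let s := PySem.Str.strip l
    if PySem.Str.startswith s "while True:" then i
    else findRevWhile rest

def separate_code_alt (code : List String) : Int × Int :=
  let rev := (PySem.List.enumerate code).reverse
  (findRevImport rev, findRevWhile rev)

-- ===== PRECONDITION & SPEC =====
def Spec_separate_code (code : List String) (out : Int × Int) : Prop := out = separate_code_alt code
instance (code : List String) (out : Int × Int) : Decidable (Spec_separate_code code out) := by unfold Spec_separate_code; infer_instance

-- ===== CLAIM (what is proved, stated in full; the proofs are below) =====
def Claim_equal_separate_code : Prop := ∀ (code : List String), Dom_separate_code code → Spec_separate_code code (separate_code code)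

-- ===== LEMMAS AND PROOFS =====

-- predicates on a (stripped) line
def pImp (l : String) : Bool :=
  PySem.Str.startswith (PySem.Str.strip l) "from" || PySem.Str.startswith (PySem.Str.strip l) "import"
def pWh (l : String) : Bool := PySem.Str.startswith (PySem.Str.strip l) "while True:"

-- last-match accumulator (A's shape) and first-match-in-reverse (B's shape), generic in the predicate
def lastM (p : String → Bool) (a : Int) : List (Int × String) → Int
  | [] => a
  | (i, l) :: r => lastM p (if p l then i else a) r

def firstRev (p : String → Bool) : List (Int × String) → Int
  | [] => 0
  | (i, l) :: r => if p l then i else firstRev p r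

lemma stepA_eq (a b i : Int) (l : String) :
    stepA (a, b) (i, l) = (if pImp l then i else a, if !pImp l && pWh l then i else b) := by
  unfold stepA pImp pWh
  simp only [PySem.Str.startswith_eq]
  cases h1 : PySem.Chars.startswith (PySem.Chars.strip l.toList) ['f','r','o','m'] <;>
    cases h2 : PySem.Chars.startswith (PySem.Chars.strip l.toList) ['i','m','p','o','r','t'] <;>
    cases h3 : PySem.Chars.startswith (PySem.Chars.strip l.toList) ['w','h','i','l','e',' ','T','r','u','e',':'] <;>
    simp [h1, h2, h3]

lemma foldA_eq (ps : List (Int × String)) : ∀ (a b : Int),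
    ps.foldl stepA (a, b)
    = (lastM pImp a ps, lastM (fun l => !pImp l && pWh l) b ps) := by
  induction ps with
  | nil => intro a b; simp [lastM]
  | cons x r ih =>
    intro a b
    obtain ⟨i, l⟩ := x
    rw [List.foldl_cons, stepA_eq]
    simp only [lastM]
    exact ih _ _

lemma lastM_concat (p : String → Bool) (ps : List (Int × String)) (i : Int) (l : String) :
    ∀ a, lastM p a (ps ++ [(i, l)]) = if p l then i else lastM p a ps := by
  induction ps with
  | nil => intro a; simp [lastM]
  | cons x r ih => intro a; obtain ⟨j, m⟩ := x; simp [lastM, ih]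

lemma lastM_eq_firstRev (p : String → Bool) (ps : List (Int × String)) :
    lastM p 0 ps = firstRev p ps.reverse := by
  induction ps using List.reverseRecOn with
  | nil => simp [lastM, firstRev]
  | append_singleton r x ih =>
    obtain ⟨i, l⟩ := x
    rw [lastM_concat, List.reverse_append]
    simp [firstRev, ih]

-- a stripped line starting with "while True:" cannot start with "from" or "import"
lemma while_not_imp (l : String) (h : pWh l = true) : pImp l = false := by
  unfold pWh at h
  unfold pImp
  simp only [PySem.Str.startswith_eq] at *
  rw [PySem.Chars.startswith_iff] at h
  obtain ⟨t, ht⟩ := h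
  simp only [Bool.or_eq_false_iff]
  constructor <;>
  · rw [Bool.eq_false_iff, Ne, PySem.Chars.startswith_iff]
    rintro ⟨u, hu⟩
    rw [← ht] at hu
    simp only [show "while True:".toList = ['w','h','i','l','e',' ','T','r','u','e',':'] from rfl,
      show "from".toList = ['f','r','o','m'] from rfl,
      show "import".toList = ['i','m','p','o','r','t'] from rfl,
      List.cons_append, List.cons.injEq] at hu
    exact absurd hu.1 (by decide)

lemma firstRev_wh (ps : List (Int × String)) :
    firstRev (fun l => !pImp l && pWh l) ps = firstRev pWh ps := by
  induction ps with
  | nil => rfl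
  | cons x r ih =>
    obtain ⟨i, l⟩ := x
    by_cases h2 : pWh l
    · simp [firstRev, h2, while_not_imp l h2]
    · simp [firstRev, h2, ih]

lemma findRevImport_eq (ps : List (Int × String)) : findRevImport ps = firstRev pImp ps := by
  induction ps with
  | nil => rfl
  | cons x r ih => obtain ⟨i, l⟩ := x; simp [findRevImport, firstRev, pImp, ih]

lemma findRevWhile_eq (ps : List (Int × String)) : findRevWhile ps = firstRev pWh ps := by
  induction ps with
  | nil => rfl
  | cons x r ih => obtain ⟨i, l⟩ := x; simp [findRevWhile, firstRev, pWh, ih]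

-- ===== VERDICT (by name: the statement is the Claim_ definition above) =====
theorem separate_code_spec : Claim_equal_separate_code := by
  intro code _
  unfold Spec_separate_code separate_code separate_code_alt
  show _ = (findRevImport _, findRevWhile _)
  rw [foldA_eq, lastM_eq_firstRev, lastM_eq_firstRev, firstRev_wh,
    findRevImport_eq, findRevWhile_eq]
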